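-- pv_equiv track=rewrite | github.com/aayushgauba/personalai | events/views.py | setPreviousDays
-- ===== SOURCE A (Python) =====
-- def setPreviousDays(array, elem):
--     if elem == -1:
--         return array
--     elif elem > -1:
--         if(array[elem + 1][0] == 0):
--             array[elem][0] = 6
--             return setPreviousDays(array, elem-1)
--         elif(array[elem + 1][0] >= 0 and array[elem+ 1][0] <= 6):
--             array[elem][0] = array[elem+1][0] -1
--             return setPreviousDays(array, elem-1)
-- ===== SOURCE B (Python) =====
-- def setPreviousDays(array, elem):
--     if elem == -1:
--         return array
--     if elem < -1:
--         return None
--     v = array[elem + 1][0]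
--     if not (0 <= v <= 6):
--         return None
--     for i in range(elem + 1):
--         array[i][0] = (v - (elem + 1 - i)) % 7
--     return array
-- ===== Notes on version B (the rewrite author's own statement) =====
-- stated objective: alternative
-- what changed: Replaces A's day-by-day recursion (each step reading the value it just wrote) with a single flat forward loop that writes each cell directly from the closed form (v - (elem+1-i)) % 7, where v is the anchor value array[elem+1][0]; Pre_ excludes inputs where A raises (IndexError on array[elem+1] / empty rows) or returns None (elem < -1, or anchor value outside 0..6), which is not a value of the declared list type.
-- outside the precondition, e.g. on setPreviousDays([[9], [9]], 0): A returns None, B returns None; on setPreviousDays([[1]], -5): A returns None, B returns None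
import Mathlib
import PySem

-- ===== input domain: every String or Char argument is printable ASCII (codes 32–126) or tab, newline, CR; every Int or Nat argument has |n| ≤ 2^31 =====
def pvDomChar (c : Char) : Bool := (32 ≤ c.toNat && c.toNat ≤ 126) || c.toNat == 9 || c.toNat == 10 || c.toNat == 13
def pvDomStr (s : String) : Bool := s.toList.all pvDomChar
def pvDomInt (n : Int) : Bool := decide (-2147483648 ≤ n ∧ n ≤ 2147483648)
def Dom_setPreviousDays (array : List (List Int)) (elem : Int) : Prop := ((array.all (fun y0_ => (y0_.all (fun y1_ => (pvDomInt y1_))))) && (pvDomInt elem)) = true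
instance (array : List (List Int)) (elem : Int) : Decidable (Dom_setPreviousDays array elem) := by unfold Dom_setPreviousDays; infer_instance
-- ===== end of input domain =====

-- B replaces A's step-by-step recursion with one flat loop writing each cell from a closed form;
-- equivalence is about the RETURN value (both A and B also mutate the row lists in place on the
-- admitted inputs, with the same final state).

-- ===== PORT A =====
-- Literal port of A's recursion. Where the Python raises (index out of range, empty row) or falls
-- through returning None (elem < -1, or a next-day value outside 0..6) the port returns `array`
-- unchanged; all such inputs are excluded by Pre_setPreviousDays.
def setPreviousDays (array : List (List Int)) (elem : Int) : List (List Int) :=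
  if elem = -1 then array
  else if elem > -1 then
    match PySem.List.pyGet? array (elem + 1) with
    | none => array        -- IndexError (outside Pre_)
    | some nxt =>
      match PySem.List.pyGet? nxt 0 with
      | none => array      -- IndexError (outside Pre_)
      | some v =>
        if v = 0 then
          match PySem.List.pyGet? array elem with
          | none => array  -- IndexError (outside Pre_)
          | some row =>
            setPreviousDays (PySem.List.pySetD array elem (PySem.List.pySetD row 0 6)) (elem - 1)
        else if 0 ≤ v ∧ v ≤ 6 then
          match PySem.List.pyGet? array elem with
          | none => array  -- IndexError (outside Pre_)
          | some row =>
            setPreviousDays (PySem.List.pySetD array elem (PySem.List.pySetD row 0 (v - 1))) (elem - 1)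
        else array         -- Python returns None here (outside Pre_)
  else array               -- elem < -1: Python returns None (outside Pre_)
termination_by (elem + 1).toNat
decreasing_by all_goals omega

-- ===== PORT B =====
-- Port of Source B: read the anchor v = array[elem+1][0] once, then one forward loop writing
-- array[i][0] = (v - (elem+1-i)) % 7 for i in range(elem+1).
def setPreviousDays_alt (array : List (List Int)) (elem : Int) : List (List Int) :=
  if elem = -1 then array
  else if elem < -1 then array   -- Python B returns None here (outside Pre_)
  else
    match (PySem.List.pyGet? array (elem + 1)).bind (fun r => PySem.List.pyGet? r 0) with
    | none => array              -- IndexError (outside Pre_)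
    | some v =>
      if 0 ≤ v ∧ v ≤ 6 then
        (List.range (elem + 1).toNat).foldl
          (fun acc (i : Nat) =>
            PySem.List.pySetD acc (i : Int)
              (PySem.List.pySetD (PySem.List.pyGetD acc (i : Int) [])
                0 (PySem.Int.mod (v - (elem + 1 - (i : Int))) 7))) array
      else array                 -- Python B returns None here (outside Pre_)

-- ===== PRECONDITION & SPEC =====
-- Pre_ admits exactly the inputs where Python A returns a list: elem = -1, or elem ≥ 0 with
-- array[elem+1] in range, rows 0..elem+1 nonempty, and anchor value array[elem+1][0] in 0..6.
-- Excluded inputs are those where A raises IndexError or returns None (elem < -1 / anchor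
-- outside 0..6), None not being a value of the declared list type.
def Pre_setPreviousDays (array : List (List Int)) (elem : Int) : Prop :=
  elem = -1 ∨
    (0 ≤ elem ∧ elem.toNat + 1 < array.length ∧
      (∀ r ∈ array.take (elem.toNat + 2), r ≠ []) ∧
      0 ≤ (array.getD (elem.toNat + 1) []).headD 0 ∧
      (array.getD (elem.toNat + 1) []).headD 0 ≤ 6)
instance (array : List (List Int)) (elem : Int) : Decidable (Pre_setPreviousDays array elem) := by
  unfold Pre_setPreviousDays; infer_instance

def pvWitness_setPreviousDays : List (List Int) × Int := ([[3], [2]], 0)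

def Spec_setPreviousDays (array : List (List Int)) (elem : Int) (out : List (List Int)) : Prop := out = setPreviousDays_alt array elem
instance (array : List (List Int)) (elem : Int) (out : List (List Int)) : Decidable (Spec_setPreviousDays array elem out) := by unfold Spec_setPreviousDays; infer_instance

-- ===== CLAIM (what is proved, stated in full; the proofs are below) =====
def Claim_equal_setPreviousDays : Prop := ∀ (array : List (List Int)) (elem : Int), Dom_setPreviousDays array elem → Pre_setPreviousDays array elem → Spec_setPreviousDays array elem (setPreviousDays array elem)

-- ===== LEMMAS AND PROOFS =====

-- B's loop body, with anchor value v and anchor position n+1 (so it writes indices 0..n).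
def pvStep (v : Int) (n : Nat) (acc : List (List Int)) (i : Nat) : List (List Int) :=
  acc.set i ((acc.getD i []).set 0 (PySem.Int.mod (v - ((n : Int) + 1 - (i : Int))) 7))

lemma pvStep_eq (v : Int) (n : Nat) (acc : List (List Int)) (i : Nat) :
    (PySem.List.pySetD acc ((i : Nat) : Int)
      (PySem.List.pySetD (PySem.List.pyGetD acc ((i : Nat) : Int) [])
        0 (PySem.Int.mod (v - ((n : Int) + 1 - (i : Int))) 7))) = pvStep v n acc i := by
  simp [pvStep, PySem.List.pyGetD_natCast, PySem.List.pySetD_of_nonneg]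

-- arithmetic: shifting the anchor one step commutes with % 7
lemma pvMod_shift (a b : Int) : PySem.Int.mod (PySem.Int.mod a 7 - b) 7 = PySem.Int.mod (a - b) 7 := by
  rw [PySem.Int.mod_eq_emod_of_pos (by norm_num), PySem.Int.mod_eq_emod_of_pos (by norm_num),
      PySem.Int.mod_eq_emod_of_pos (by norm_num)]
  omega

-- the prefix loop over indices < j does not touch index j …
lemma pvFoldl_getD_ne (v : Int) (n : Nat) (is : List Nat) (j : Nat)
    (h : ∀ i ∈ is, i ≠ j) : ∀ l : List (List Int),
    (is.foldl (pvStep v n) l).getD j [] = l.getD j [] := by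
  induction is with
  | nil => intro l; rfl
  | cons i is ih =>
    intro l
    have hij : i ≠ j := h i (by simp)
    rw [List.foldl_cons, ih (fun x hx => h x (by simp [hx]))]
    simp [pvStep, List.getD_eq_getElem?_getD, List.getElem?_set_ne hij]

-- … and commutes with a write at index j
lemma pvFoldl_set_comm (v : Int) (n : Nat) (is : List Nat) (j : Nat) (r : List Int)
    (h : ∀ i ∈ is, i ≠ j) : ∀ l : List (List Int),
    (is.foldl (pvStep v n) l).set j r = is.foldl (pvStep v n) (l.set j r) := by
  induction is with
  | nil => intro l; rfl
  | cons i is ih =>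
    intro l
    have hij : i ≠ j := h i (by simp)
    rw [List.foldl_cons, ih (fun x hx => h x (by simp [hx])), List.foldl_cons]
    congr 1
    simp only [pvStep, List.getD_eq_getElem?_getD, List.getElem?_set_ne (Ne.symm hij)]
    exact List.set_comm _ _ hij

-- shifting the anchor: the loop for anchor (v, n+1) equals the loop for anchor (mod (v-1) 7, n)
lemma pvStep_shift (v : Int) (m : Nat) (acc : List (List Int)) (i : Nat) :
    pvStep v (m + 1) acc i = pvStep (PySem.Int.mod (v - 1) 7) m acc i := by
  simp only [pvStep, pvMod_shift]
  have : v - 1 - ((m : Int) + 1 - (i : Int)) = v - ((m : Int) + 1 + 1 - (i : Int)) := by ring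
  rw [this]
  norm_num

-- main invariant: for elem = n ≥ 0 inside Pre_, A's recursion computes B's loop
lemma pvKey : ∀ (n : Nat) (array : List (List Int)) (v : Int),
    n + 1 < array.length →
    (∀ r ∈ array.take (n + 2), r ≠ []) →
    (array.getD (n + 1) []).headD 0 = v →
    0 ≤ v → v ≤ 6 →
    setPreviousDays array (n : Int) = (List.range (n + 1)).foldl (pvStep v n) array := by
  intro n
  induction n with
  | zero =>
    intro array v hlen hne hv h0 h6
    have hget : array[1]? = some (array.getD 1 []) := by
      simp [List.getD_eq_getElem?_getD, List.getElem?_eq_getElem hlen]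
    have hnxt_ne : array.getD 1 [] ≠ [] := by
      apply hne
      rw [List.getD_eq_getElem?_getD, List.getElem?_eq_getElem hlen]
      exact List.mem_take_iff_getElem.mpr ⟨1, by omega, by simp⟩
    rcases List.exists_cons_of_ne_nil hnxt_ne with ⟨b, bt, hnx⟩
    rw [hnx] at hget hv
    have hb : b = v := by simpa using hv
    subst hb
    have h0lt : 0 < array.length := by omega
    have hrow : array[0]? = some (array.getD 0 []) := by
      simp [List.getD_eq_getElem?_getD, List.getElem?_eq_getElem h0lt]
    simp only [Nat.cast_zero]
    rw [setPreviousDays]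
    simp only [show ¬((0 : Int) = -1) by decide, if_false, show (0 : Int) > -1 by decide, if_true]
    rw [show ((0 : Int) + 1) = ((1 : Nat) : Int) by norm_num, PySem.List.pyGet?_natCast]
    simp only [hget, PySem.List.pyGet?_zero_cons]
    simp only [PySem.List.pyGet?_zero, hrow]
    rw [List.range_one, List.foldl_cons, List.foldl_nil]
    unfold pvStep
    simp only [Nat.cast_zero]
    by_cases hb0 : b = 0
    · subst hb0
      simp only [if_pos rfl]
      rw [setPreviousDays]
      simp only [show (0 : Int) - 1 = -1 by decide, if_pos rfl]
      rw [PySem.List.pySetD_of_nonneg _ _ (by norm_num),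
          PySem.List.pySetD_of_nonneg _ _ (by norm_num)]
      norm_num
    · simp only [hb0, if_false, h0, h6, and_self, if_pos trivial]
      rw [setPreviousDays]
      simp only [show (0 : Int) - 1 = -1 by decide, if_pos rfl]
      rw [PySem.List.pySetD_of_nonneg _ _ (by norm_num),
          PySem.List.pySetD_of_nonneg _ _ (by norm_num)]
      norm_num
      rw [show (b - 1) % 7 = b - 1 from by omega]
  | succ m ih =>
    intro array v hlen hne hv h0 h6
    have hme : ((m + 1 : Nat) : Int) ≠ -1 := by omega
    have hmg : ((m + 1 : Nat) : Int) > -1 := by omega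
    rw [setPreviousDays]
    simp only [hme, if_false, hmg, if_true]
    rw [show ((m + 1 : Nat) : Int) + 1 = ((m + 2 : Nat) : Int) by push_cast; ring,
        PySem.List.pyGet?_natCast]
    have hget : array[m + 2]? = some (array.getD (m + 2) []) := by
      simp [List.getD_eq_getElem?_getD, List.getElem?_eq_getElem hlen]
    have hnxt_ne : array.getD (m + 2) [] ≠ [] := by
      apply hne
      rw [List.getD_eq_getElem?_getD, List.getElem?_eq_getElem hlen]
      exact List.mem_take_iff_getElem.mpr ⟨m + 2, by omega, by simp⟩
    rcases List.exists_cons_of_ne_nil hnxt_ne with ⟨b, bt, hnx⟩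
    rw [hnx] at hget hv
    have hb : b = v := by simpa using hv
    subst hb
    simp only [hget, PySem.List.pyGet?_zero_cons]
    have hmlt : m + 1 < array.length := by omega
    have hrow : array[m + 1]? = some (array.getD (m + 1) []) := by
      simp [List.getD_eq_getElem?_getD, List.getElem?_eq_getElem hmlt]
    have hrow_ne : array.getD (m + 1) [] ≠ [] := by
      apply hne
      rw [List.getD_eq_getElem?_getD, List.getElem?_eq_getElem hmlt]
      exact List.mem_take_iff_getElem.mpr ⟨m + 1, by omega, by simp⟩
    set row := array.getD (m + 1) [] with hrowdef
    -- the common continuation, for the written value w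
    have main : ∀ w : Int, w = PySem.Int.mod (b - 1) 7 →
        setPreviousDays (array.set (m + 1) (row.set 0 w)) (((m + 1 : Nat) : Int) - 1)
          = (List.range (m + 2)).foldl (pvStep b (m + 1)) array := by
      intro w hw
      set array' := array.set (m + 1) (row.set 0 w) with harr'
      have hlen' : m + 1 < array'.length := by simp [harr']; omega
      have hgd' : array'.getD (m + 1) [] = row.set 0 w := by
        rw [harr', List.getD_eq_getElem?_getD, List.getElem?_set_self (by simpa using hmlt)]
        simp
      have hw0 : 0 ≤ w := hw ▸ PySem.Int.mod_nonneg _ (by norm_num)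
      have hw6 : w ≤ 6 := by
        have := PySem.Int.mod_lt (b - 1) (b := 7) (by norm_num); omega
      have hne' : ∀ r ∈ array'.take (m + 2), r ≠ [] := by
        intro r hr
        rcases List.mem_take_iff_getElem.mp hr with ⟨k, hk, hkr⟩
        have hk' : k < array'.length := by omega
        have hq : array'[k]? = some r := by
          rw [List.getElem?_eq_getElem hk']; exact congrArg some hkr
        by_cases hkm : k = m + 1
        · subst hkm
          rw [harr', List.getElem?_set_self hmlt] at hq
          have hr' : r = row.set 0 w := by
            have := hq; injection this with h'; exact h'.symm
          subst hr'
          intro hcon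
          have := congrArg List.length hcon
          simp at this
          exact hrow_ne this
        · rw [harr', List.getElem?_set_ne (by omega)] at hq
          rcases List.getElem?_eq_some_iff.mp hq with ⟨hkl, hkr2⟩
          apply hne
          exact List.mem_take_iff_getElem.mpr ⟨k, by omega, hkr2⟩
      have hhead' : (array'.getD (m + 1) []).headD 0 = w := by
        rw [hgd']
        rcases List.exists_cons_of_ne_nil hrow_ne with ⟨c, ct, hc⟩
        rw [hc]; simp
      rw [show ((m + 1 : Nat) : Int) - 1 = ((m : Nat) : Int) by push_cast; ring]
      rw [ih array' w hlen' hne' hhead' hw0 hw6]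
      -- now relate the two loops
      conv_rhs => rw [List.range_succ]
      rw [List.foldl_append, List.foldl_cons, List.foldl_nil]
      have hmemne : ∀ i ∈ List.range (m + 1), i ≠ m + 1 := by
        intro i hi; simp at hi; omega
      have h1 : ((List.range (m + 1)).foldl (pvStep b (m + 1)) array).getD (m + 1) []
          = array.getD (m + 1) [] := pvFoldl_getD_ne b (m + 1) _ _ hmemne array
      have h2 : ((List.range (m + 1)).foldl (pvStep b (m + 1)) array).set (m + 1) (row.set 0 w)
          = (List.range (m + 1)).foldl (pvStep b (m + 1)) array' :=
        pvFoldl_set_comm b (m + 1) _ _ _ hmemne array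
      -- the last write of the (b, m+1)-loop produces array', pushed inside
      have hval : pvStep b (m + 1) ((List.range (m + 1)).foldl (pvStep b (m + 1)) array) (m + 1)
          = (List.range (m + 1)).foldl (pvStep b (m + 1)) array' := by
        calc pvStep b (m + 1) ((List.range (m + 1)).foldl (pvStep b (m + 1)) array) (m + 1)
            = ((List.range (m + 1)).foldl (pvStep b (m + 1)) array).set (m + 1)
                ((((List.range (m + 1)).foldl (pvStep b (m + 1)) array).getD (m + 1) []).set 0
                  (PySem.Int.mod (b - (((m + 1 : Nat) : Int) + 1 - ((m + 1 : Nat) : Int))) 7)) := rfl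
          _ = (List.range (m + 1)).foldl (pvStep b (m + 1)) array' := by
              rw [h1, ← hrowdef,
                  show PySem.Int.mod (b - (((m + 1 : Nat) : Int) + 1 - ((m + 1 : Nat) : Int))) 7 = w
                    from by rw [hw]; congr 1; push_cast; ring]
              exact h2
      rw [hval]
      -- shift the anchor of the remaining loop
      apply PySem.List.foldl_congr_mem
      intro acc i _
      rw [pvStep_shift, ← hw]
    by_cases hb0 : b = 0
    · subst hb0
      simp only [if_pos rfl]
      rw [show ((m + 1 : Nat) : Int) = (((m + 1 : Nat) : Nat) : Int) by norm_num,
          PySem.List.pyGet?_natCast, hrow]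
      simp only [PySem.List.pySetD_natCast]
      rw [PySem.List.pySetD_of_nonneg _ _ (by norm_num)]
      exact main 6 (by decide)
    · simp only [hb0, if_false, h0, h6, and_self, if_pos trivial]
      rw [show ((m + 1 : Nat) : Int) = (((m + 1 : Nat) : Nat) : Int) by norm_num,
          PySem.List.pyGet?_natCast, hrow]
      simp only [PySem.List.pySetD_natCast]
      rw [PySem.List.pySetD_of_nonneg _ _ (by norm_num)]
      apply main
      rw [PySem.Int.mod_eq_emod_of_pos (by norm_num)]
      omega

-- ===== VERDICT (by name: the statement is the Claim_ definition above) =====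
theorem setPreviousDays_spec : Claim_equal_setPreviousDays := by
  unfold Claim_equal_setPreviousDays
  intro array elem _ hpre
  unfold Spec_setPreviousDays
  rcases hpre with h1 | ⟨h0, hlen, hne, hv0, hv6⟩
  · subst h1
    rw [setPreviousDays, setPreviousDays_alt]; simp
  · set n := elem.toNat with hn
    have he : elem = (n : Int) := by omega
    set v := (array.getD (n + 1) []).headD 0 with hvdef
    have hget : array[n + 1]? = some (array.getD (n + 1) []) := by
      simp [List.getD_eq_getElem?_getD, List.getElem?_eq_getElem hlen]
    have hnxt_ne : array.getD (n + 1) [] ≠ [] := by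
      apply hne
      rw [List.getD_eq_getElem?_getD, List.getElem?_eq_getElem hlen]
      exact List.mem_take_iff_getElem.mpr ⟨n + 1, by omega, by simp⟩
    have hhead : (array.getD (n + 1) []).headD 0 = v := rfl
    rw [he]
    rw [pvKey n array v hlen hne hhead hv0 hv6]
    rw [setPreviousDays_alt]
    have hne1 : ¬ (((n : Nat) : Int) = -1) := by omega
    have hnl1 : ¬ ((n : Nat) : Int) < -1 := by omega
    simp only [hne1, if_false, hnl1]
    rcases List.exists_cons_of_ne_nil hnxt_ne with ⟨b, bt, hnx⟩
    rw [hnx] at hget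
    have hb : b = v := by rw [← hhead, hnx]; simp
    subst hb
    rw [show ((n : Nat) : Int) + 1 = ((n + 1 : Nat) : Int) by push_cast; ring,
        PySem.List.pyGet?_natCast]
    simp only [hget, Option.bind_some, PySem.List.pyGet?_zero_cons, hv0, hv6, and_self, if_pos trivial]
    rw [show ((n + 1 : Nat) : Int) = ((n : Nat) : Int) + 1 by push_cast; ring]
    rw [show (((n : Nat) : Int) + 1).toNat = n + 1 by omega]
    apply PySem.List.foldl_congr_mem
    intro acc i _
    exact (pvStep_eq v n acc i).symm
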